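-- pv_equiv track=rewrite | github.com/pypi-data/pypi-mirror-392 | packages/wiliot-testers/wiliot_testers-5.12.2rc0-py3-none-any.whl/wiliot_testers/association_tester/configs/packets_configs.py | get_packet_param
-- ===== SOURCE A (Python) =====
-- packet_parameters = {
--     'packet_type': [
--         {'flow_min': None, 'flow_max': '0x503', 'value': 0},  # version <= 2.3
--         {'flow_min': '0x504', 'flow_max': '0x5ff', 'value': 1},  # version 2.4, 2.5, 2.9
--         {'flow_min': '0x600', 'flow_max': None, 'value': 3},  # version 3.0
--     ],
-- }
--
-- def get_packet_param(flow_in, param_name):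
--     """
--     This function extract the value of the specified parameter name based on the packet flow version
--     :param flow_in the packet flow version
--     :type flow_in str
--     :param param_name the flow parameter
--     :type param_name str
--     """
--     flow_in = flow_in.lower().replace('.', '')
--     flow_in = flow_in if flow_in.startswith('0x') else '0x' + flow_in
--     if param_name not in packet_parameters.keys():
--         raise Exception(f'get_flow_params: param_name is not in the map: {packet_parameters.keys()}')
--
--     param_values = packet_parameters[param_name]
--     for packet_flow in param_values:
--         if packet_flow['flow_max'] and flow_in > packet_flow['flow_max']:
--             continue
--         if packet_flow['flow_min'] and flow_in < packet_flow['flow_min']: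
--             raise Exception(f'flow_in is {flow_in} but we could not find a match flow')
--         return packet_flow['value']
-- ===== SOURCE B (Python) =====
-- def get_packet_param(flow_in, param_name):
--     """Map a packet flow version string to its packet_type value."""
--     flow = flow_in.lower().replace('.', '')
--     if not flow.startswith('0x'):
--         flow = '0x' + flow
--     if param_name != 'packet_type':
--         raise Exception(f'get_packet_param: unknown param_name {param_name!r}')
--     if flow <= '0x503':
--         return 0
--     if '0x504' <= flow <= '0x5ff':
--         return 1
--     if flow >= '0x600':
--         return 3
--     raise Exception(f'get_packet_param: no matching flow for {flow}')
-- ===== Notes on version B (the rewrite author's own statement) =====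
-- stated objective: simpler
-- what changed: Replaced the module-level packet_parameters table and the for-loop scan (with its continue/raise/return protocol) by explicit chained range comparisons on the normalized flow string; Pre_ excludes exactly the inputs on which A raises (foreign param_name and normalized flows in the gaps 0x503..0x504 and 0x5ff..0x600), where B also raises.
import Mathlib
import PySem

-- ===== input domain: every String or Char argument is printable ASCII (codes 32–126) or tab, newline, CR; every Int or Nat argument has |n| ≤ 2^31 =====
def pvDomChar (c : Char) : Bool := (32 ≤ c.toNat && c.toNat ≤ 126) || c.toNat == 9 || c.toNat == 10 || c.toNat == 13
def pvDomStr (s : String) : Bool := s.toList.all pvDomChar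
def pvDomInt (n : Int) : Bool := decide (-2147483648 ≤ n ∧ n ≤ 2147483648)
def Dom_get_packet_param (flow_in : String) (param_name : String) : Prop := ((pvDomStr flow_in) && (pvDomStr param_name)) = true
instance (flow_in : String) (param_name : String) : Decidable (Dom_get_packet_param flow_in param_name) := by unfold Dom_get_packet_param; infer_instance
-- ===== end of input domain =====

-- B replaces A's table-driven scan over `packet_parameters` with explicit chained range
-- comparisons (objective: simpler). Return-value equivalence; raising inputs are outside Pre_.
-- Python str comparison is code-point lexicographic = '<' on List Char (see PYSEM.md).

-- ===== PORT A =====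
-- the 'packet_type' table: (flow_min, flow_max, value); Python None -> none
def pvTable : List (Option (List Char) × Option (List Char) × Int) :=
  [(none, some "0x503".toList, 0),
   (some "0x504".toList, some "0x5ff".toList, 1),
   (some "0x600".toList, none, 3)]

-- the for-loop over the table; 0 stands for the raised Exception / falling off the loop (outside Pre_)
def pvLoop (f : List Char) : List (Option (List Char) × Option (List Char) × Int) → Int
  | [] => 0
  | (mn, mx, v) :: rest =>
    if (match mx with | some m => decide (m < f) | none => false) then pvLoop f rest
    else if (match mn with | some m => decide (f < m) | none => false) then 0
    else v

def get_packet_param (flow_in : String) (param_name : String) : Int :=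
  let f0 := PySem.Str.replace (PySem.Str.lower flow_in) "." ""
  let f := if PySem.Str.startswith f0 "0x" then f0 else "0x" ++ f0
  if param_name ≠ "packet_type" then 0   -- raise (outside Pre_)
  else pvLoop f.toList pvTable

-- ===== PORT B =====
def get_packet_param_alt (flow_in : String) (param_name : String) : Int :=
  let f0 := PySem.Str.replace (PySem.Str.lower flow_in) "." ""
  let f := if PySem.Str.startswith f0 "0x" then f0 else "0x" ++ f0
  if param_name ≠ "packet_type" then 0   -- raise (outside Pre_)
  else if f.toList ≤ "0x503".toList then 0
  else if "0x504".toList ≤ f.toList ∧ f.toList ≤ "0x5ff".toList then 1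
  else if "0x600".toList ≤ f.toList then 3
  else 0   -- raise (outside Pre_)

-- ===== PRECONDITION & SPEC =====
-- the normalized flow string (as both Pythons compute it first), as a char list
def pvNorm (s : String) : List Char :=
  let f0 := PySem.Str.replace (PySem.Str.lower s) "." ""
  (if PySem.Str.startswith f0 "0x" then f0 else "0x" ++ f0).toList

-- Pre_ excludes exactly the inputs on which A raises an Exception: a param_name other than
-- 'packet_type', and normalized flows falling in one of the two gaps between a table entry's flow_max
-- and the next entry's flow_min (where the loop raises 'could not find a match flow'); B also raises there.
def Pre_get_packet_param (flow_in : String) (param_name : String) : Prop :=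
  param_name = "packet_type" ∧
  ¬ ("0x503".toList < pvNorm flow_in ∧ pvNorm flow_in < "0x504".toList) ∧
  ¬ ("0x5ff".toList < pvNorm flow_in ∧ pvNorm flow_in < "0x600".toList)
instance (flow_in : String) (param_name : String) : Decidable (Pre_get_packet_param flow_in param_name) := by unfold Pre_get_packet_param; infer_instance

def pvWitness_get_packet_param : String × String := ("5.04", "packet_type")

def Spec_get_packet_param (flow_in : String) (param_name : String) (out : Int) : Prop := out = get_packet_param_alt flow_in param_name
instance (flow_in : String) (param_name : String) (out : Int) : Decidable (Spec_get_packet_param flow_in param_name out) := by unfold Spec_get_packet_param; infer_instance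

-- ===== CLAIM (what is proved, stated in full; the proofs are below) =====
def Claim_equal_get_packet_param : Prop := ∀ (flow_in : String) (param_name : String), Dom_get_packet_param flow_in param_name → Pre_get_packet_param flow_in param_name → Spec_get_packet_param flow_in param_name (get_packet_param flow_in param_name)

-- ===== LEMMAS AND PROOFS =====

-- A's loop over the literal table agrees with B's comparison chain away from the two gaps.
theorem pvLoop_eq_chain (g : List Char)
    (hg1 : ¬ ("0x503".toList < g ∧ g < "0x504".toList))
    (hg2 : ¬ ("0x5ff".toList < g ∧ g < "0x600".toList)) :
    pvLoop g pvTable =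
      (if g ≤ "0x503".toList then 0
       else if "0x504".toList ≤ g ∧ g ≤ "0x5ff".toList then 1
       else if "0x600".toList ≤ g then 3
       else (0 : Int)) := by
  have hfalse : ¬ (false = true) := by decide
  simp only [pvLoop, pvTable, decide_eq_true_eq]
  by_cases h1 : ("0x503".toList : List Char) < g
  · rw [if_pos h1, if_neg (not_le.mpr h1)]
    have h4 : ("0x504".toList : List Char) ≤ g := not_lt.mp (fun h => hg1 ⟨h1, h⟩)
    by_cases h2 : ("0x5ff".toList : List Char) < g
    · have h6 : ("0x600".toList : List Char) ≤ g := not_lt.mp (fun h => hg2 ⟨h2, h⟩)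
      have : ¬ (("0x504".toList : List Char) ≤ g ∧ g ≤ "0x5ff".toList) :=
        fun h => absurd h.2 (not_le.mpr h2)
      rw [if_pos h2, if_neg hfalse, if_neg (not_lt.mpr h6), if_neg this, if_pos h6]
    · have h3 : ¬ g < "0x504".toList := not_lt.mpr h4
      rw [if_neg h2, if_neg h3, if_pos ⟨h4, not_lt.mp h2⟩]
  · rw [if_neg h1, if_neg hfalse, if_pos (not_lt.mp h1)]

-- ===== VERDICT (by name: the statement is the Claim_ definition above) =====
theorem get_packet_param_spec : Claim_equal_get_packet_param := by
  intro flow_in param_name _hDom hPre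
  obtain ⟨hp, hg1, hg2⟩ := hPre
  subst hp
  unfold Spec_get_packet_param get_packet_param get_packet_param_alt
  simp only [ne_eq, not_true_eq_false, if_false]
  exact pvLoop_eq_chain (pvNorm flow_in) hg1 hg2
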